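-- pv_equiv track=rewrite | github.com/longlivedrgn/Algorhythm | 프로그래머스/2/132265. 롤케이크 자르기/롤케이크 자르기.py | solution
-- ===== SOURCE A (Python) =====
-- from collections import Counter
--
-- def solution(topping):
--     answer = 0
--     chul = set()
--     bro = Counter(topping)
--
--     for i in topping:
--
--         chul.add(i)
--         bro[i] -= 1
--         if bro[i] == 0: # 만약 0이되면 아예 빼버린다.
--             bro.pop(i)
--
--         if len(chul) == len(bro):
--             answer += 1
--
--     return answer
-- ===== SOURCE B (Python) =====
-- def solution(topping):
--     # backward pass: right_cnt[i] = number of distinct toppings strictly after index i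
--     right_cnt = []
--     seen = set()
--     for t in reversed(topping):
--         right_cnt.append(len(seen))
--         seen.add(t)
--     right_cnt.reverse()
--     # forward pass with a growing left set
--     answer = 0
--     left = set()
--     for t, r in zip(topping, right_cnt):
--         left.add(t)
--         if len(left) == r:
--             answer += 1
--     return answer
-- ===== Notes on version B (the rewrite author's own statement) =====
-- stated objective: alternative
-- what changed: Replaces the live decremental Counter of the remaining suffix with a precomputed suffix-distinct table built by a backward pass over a plain set, followed by a separate forward pass over zip(topping, table).
import Mathlib
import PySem

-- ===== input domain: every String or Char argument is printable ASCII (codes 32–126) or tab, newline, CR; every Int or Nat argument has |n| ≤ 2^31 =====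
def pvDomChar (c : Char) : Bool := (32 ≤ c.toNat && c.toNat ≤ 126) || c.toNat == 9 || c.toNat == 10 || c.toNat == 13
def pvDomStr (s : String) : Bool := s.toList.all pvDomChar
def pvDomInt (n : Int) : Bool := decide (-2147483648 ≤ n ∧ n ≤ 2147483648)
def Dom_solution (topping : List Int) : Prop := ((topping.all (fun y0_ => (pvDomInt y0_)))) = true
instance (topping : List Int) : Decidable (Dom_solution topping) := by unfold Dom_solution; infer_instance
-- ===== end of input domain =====

-- B replaces A's live decremental Counter with a precomputed suffix-distinct table
-- (backward pass) followed by a forward counting pass: an alternative decomposition, same cost.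


-- ===== PORT A =====
-- 'bro.pop(i)' is ported as 'bro.erase i': the popped key is always present there
-- (the count of i in the remaining suffix is ≥ 1 before the decrement), where pop = erase.
def solution (topping : List Int) : Int :=
  (topping.foldl
    (fun (st : Int × PySem.Set Int × PySem.Dict Int Int) i =>
      let chul := PySem.Set.add st.2.1 i
      let bro := (st.2.2).modify i 0 (· - 1)
      let bro := if bro.getD i 0 == 0 then bro.erase i else bro
      let answer := if PySem.Set.len chul == (bro.size : Int) then st.1 + 1 else st.1
      (answer, chul, bro))
    (0, PySem.Set.empty, PySem.Dict.counter topping)).1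

-- ===== PORT B =====
def solution_alt (topping : List Int) : Int :=
  let p := topping.reverse.foldl
    (fun (st : List Int × PySem.Set Int) t =>
      (st.1 ++ [PySem.Set.len st.2], PySem.Set.add st.2 t))
    ([], PySem.Set.empty)
  let rightCnt := p.1.reverse
  ((topping.zip rightCnt).foldl
    (fun (st : Int × PySem.Set Int) tr =>
      let left := PySem.Set.add st.2 tr.1
      (if PySem.Set.len left == tr.2 then st.1 + 1 else st.1, left))
    (0, PySem.Set.empty)).1

-- ===== PRECONDITION & SPEC =====
def Spec_solution (topping : List Int) (out : Int) : Prop := out = solution_alt topping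
instance (topping : List Int) (out : Int) : Decidable (Spec_solution topping out) := by unfold Spec_solution; infer_instance

-- ===== CLAIM (what is proved, stated in full; the proofs are below) =====
def Claim_equal_solution : Prop := ∀ (topping : List Int), Dom_solution topping → Spec_solution topping (solution topping)

-- ===== LEMMAS AND PROOFS =====

-- reference count: number of cut positions, prefix set carried explicitly
def refCount (pre : PySem.Set Int) : List Int → Int
  | [] => 0
  | i :: tl =>
    (if PySem.Set.len (PySem.Set.add pre i) == PySem.Set.len (PySem.Set.ofList tl) then 1 else 0)
      + refCount (PySem.Set.add pre i) tl

-- erase on a Dict: effect on lookup and keys (PySem has no erase lemmas)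
lemma find?_filter_ne (l : List (Int × Int)) (k k' : Int) (h : k' ≠ k) :
    (l.filter (fun p => !(p.1 == k))).find? (fun p => p.1 == k') = l.find? (fun p => p.1 == k') := by
  induction l with
  | nil => rfl
  | cons p l ih =>
    by_cases hk : p.1 = k
    · simp [hk, Ne.symm h, ih]
    · by_cases hk' : p.1 = k'
      · simp [hk', h]
      · simp [hk, hk', ih]

lemma find?_filter_self (l : List (Int × Int)) (k : Int) :
    (l.filter (fun p => !(p.1 == k))).find? (fun p => p.1 == k) = none := by
  induction l with
  | nil => rfl
  | cons p l ih =>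
    by_cases hk : p.1 = k
    · simp [hk, ih]
    · simp [hk, ih]

lemma getD_erase (d : PySem.Dict Int Int) (k k' : Int) (v : Int) :
    (d.erase k).getD k' v = if k' = k then v else d.getD k' v := by
  by_cases h : k' = k
  · subst h
    show (Option.map _ ((d.items.filter _).find? _)).getD v = _
    rw [find?_filter_self]
    simp
  · show (Option.map _ ((d.items.filter _).find? _)).getD v = _
    rw [find?_filter_ne d.items k k' h]
    simp [PySem.Dict.getD, PySem.Dict.get?, h]

lemma keys_erase (d : PySem.Dict Int Int) (k : Int) :
    (d.erase k).keys = d.keys.filter (fun x => !(x == k)) := by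
  show (d.items.filter _).map _ = (d.items.map _).filter _
  induction d.items with
  | nil => rfl
  | cons p l ih => by_cases h : p.1 = k <;> simp [h, ih]

-- A's loop invariant: bro is exactly the multiset of the not-yet-processed suffix l
lemma loopA (l : List Int) : ∀ (ans : Int) (chul : PySem.Set Int) (bro : PySem.Dict Int Int),
    bro.keys.Nodup →
    (∀ k, bro.getD k 0 = l.count k) →
    (∀ k, k ∈ bro.keys ↔ k ∈ l) →
    (l.foldl
      (fun (st : Int × PySem.Set Int × PySem.Dict Int Int) i =>
        let chul := PySem.Set.add st.2.1 i
        let bro := (st.2.2).modify i 0 (· - 1)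
        let bro := if bro.getD i 0 == 0 then bro.erase i else bro
        let answer := if PySem.Set.len chul == (bro.size : Int) then st.1 + 1 else st.1
        (answer, chul, bro))
      (ans, chul, bro)).1 = ans + refCount chul l := by
  induction l with
  | nil => intro ans chul bro _ _ _; simp [refCount]
  | cons i tl ih =>
    intro ans chul bro hnd hcnt hmem
    set B1 := bro.modify i 0 (fun x => x - 1) with hB1
    set X := if (B1.getD i 0 == 0) then B1.erase i else B1 with hX
    have hcnt1 : ∀ k, B1.getD k 0 = (tl.count k : Int) := by
      intro k
      rw [hB1, PySem.Dict.getD_modify]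
      by_cases hk : k = i
      · subst hk; rw [if_pos rfl, hcnt]; simp
      · rw [if_neg hk, hcnt]; simp [Ne.symm hk]
    have hmem1 : ∀ k, k ∈ B1.keys ↔ k = i ∨ k ∈ i :: tl := by
      intro k
      rw [hB1, PySem.Dict.keys_modify, PySem.Dict.mem_keys_insert, hmem k]
    have hnd1 : B1.keys.Nodup := by
      rw [hB1, PySem.Dict.keys_modify]
      exact PySem.Dict.nodup_keys_insert _ _ _ hnd
    have hfacts : X.keys.Nodup ∧ (∀ k, X.getD k 0 = (tl.count k : Int))
        ∧ (∀ k, k ∈ X.keys ↔ k ∈ tl) := by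
      by_cases hin : i ∈ tl
      · have hcond : (B1.getD i 0 == 0) = false := by
          rw [hcnt1 i]; simp [List.count_eq_zero, hin]
        rw [hX, if_neg (by simp [hcond])]
        refine ⟨hnd1, hcnt1, fun k => ?_⟩
        rw [hmem1 k, List.mem_cons]
        constructor
        · rintro (rfl | rfl | h); exacts [hin, hin, h]
        · exact fun h => Or.inr (Or.inr h)
      · have hcond : (B1.getD i 0 == 0) = true := by
          rw [hcnt1 i, List.count_eq_zero.mpr hin]; simp
        rw [hX, if_pos (by simp [hcond])]
        refine ⟨?_, fun k => ?_, fun k => ?_⟩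
        · rw [keys_erase]; exact hnd1.filter _
        · rw [getD_erase]
          by_cases hk : k = i
          · subst hk; rw [if_pos rfl, List.count_eq_zero.mpr hin]; simp
          · rw [if_neg hk, hcnt1]
        · rw [keys_erase, List.mem_filter, hmem1 k, List.mem_cons]
          constructor
          · rintro ⟨h1, h2⟩
            have hne : k ≠ i := by simpa using h2
            rcases h1 with rfl | rfl | h
            exacts [absurd rfl hne, absurd rfl hne, h]
          · intro h
            have hne : k ≠ i := fun e => hin (e ▸ h)
            exact ⟨Or.inr (Or.inr h), by simpa using hne⟩
    obtain ⟨hnd2, hcnt2, hmem2⟩ := hfacts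
    have hperm : X.keys.Perm (PySem.Set.ofList tl) :=
      (List.perm_ext_iff_of_nodup hnd2 (PySem.Set.nodup_ofList _)).2
        (fun k => by rw [hmem2 k, PySem.Set.mem_ofList])
    have hsz : (X.size : Int) = PySem.Set.len (PySem.Set.ofList tl) := by
      have h1 : X.size = X.keys.length := by simp [PySem.Dict.size, PySem.Dict.keys]
      rw [h1, hperm.length_eq]; rfl
    have main := ih (if PySem.Set.len (PySem.Set.add chul i) == (X.size : Int)
        then ans + 1 else ans) (PySem.Set.add chul i) X hnd2 hcnt2 hmem2
    rw [List.foldl_cons]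
    exact main.trans (by rw [hsz]; simp only [refCount]; split_ifs <;> omega)

-- sizes recorded by B's backward pass
def sizes (s : PySem.Set Int) : List Int → List Int
  | [] => []
  | t :: ts => PySem.Set.len s :: sizes (PySem.Set.add s t) ts

def sufSizes : List Int → List Int
  | [] => []
  | _ :: tl => PySem.Set.len (PySem.Set.ofList tl) :: sufSizes tl

lemma revpass (m : List Int) : ∀ (acc : List Int) (s : PySem.Set Int),
    (m.foldl
      (fun (st : List Int × PySem.Set Int) t =>
        (st.1 ++ [PySem.Set.len st.2], PySem.Set.add st.2 t))
      (acc, s)) = (acc ++ sizes s m, PySem.Set.update s m) := by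
  induction m with
  | nil => intro acc s; simp [sizes, PySem.Set.update_nil]
  | cons t ts ih =>
    intro acc s
    simp only [List.foldl_cons]
    rw [ih (acc ++ [PySem.Set.len s]) (PySem.Set.add s t)]
    simp [sizes, PySem.Set.update_cons]

lemma sizes_append (m : List Int) : ∀ (s : PySem.Set Int) (t : Int),
    sizes s (m ++ [t]) = sizes s m ++ [PySem.Set.len (PySem.Set.update s m)] := by
  induction m with
  | nil => intro s t; simp [sizes, PySem.Set.update_nil]
  | cons x m' ih => intro s t; simp [sizes, ih, PySem.Set.update_cons]

lemma len_ofList_reverse (l : List Int) :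
    PySem.Set.len (PySem.Set.ofList l.reverse) = PySem.Set.len (PySem.Set.ofList l) := by
  have hp : (PySem.Set.ofList l.reverse).Perm (PySem.Set.ofList l) :=
    (List.perm_ext_iff_of_nodup (PySem.Set.nodup_ofList _) (PySem.Set.nodup_ofList _)).2
      (by intro a; simp [PySem.Set.mem_ofList])
  simp [PySem.Set.len, hp.length_eq]

lemma sizes_reverse (l : List Int) :
    (sizes PySem.Set.empty l.reverse).reverse = sufSizes l := by
  induction l with
  | nil => rfl
  | cons t tl ih =>
    rw [List.reverse_cons, sizes_append, List.reverse_append]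
    show PySem.Set.len (PySem.Set.update PySem.Set.empty tl.reverse) :: _ = _
    rw [show (PySem.Set.empty : PySem.Set Int) = [] from rfl, PySem.Set.update_nil_left,
      len_ofList_reverse]
    rw [show sizes [] tl.reverse = sizes PySem.Set.empty tl.reverse from rfl, ih]
    rfl

lemma zipfold (l : List Int) : ∀ (ans : Int) (left : PySem.Set Int),
    ((l.zip (sufSizes l)).foldl
      (fun (st : Int × PySem.Set Int) tr =>
        let left := PySem.Set.add st.2 tr.1
        (if PySem.Set.len left == tr.2 then st.1 + 1 else st.1, left))
      (ans, left)).1 = ans + refCount left l := by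
  induction l with
  | nil => intro ans left; simp [sufSizes, refCount]
  | cons t tl ih =>
    intro ans left
    show ((tl.zip (sufSizes tl)).foldl _
      (if PySem.Set.len (PySem.Set.add left t) == PySem.Set.len (PySem.Set.ofList tl)
        then ans + 1 else ans, PySem.Set.add left t)).1 = _
    rw [ih]
    simp only [refCount]
    split_ifs <;> omega

-- ===== VERDICT (by name: the statement is the Claim_ definition above) =====
theorem solution_spec : Claim_equal_solution := by
  intro l _
  unfold Spec_solution solution solution_alt
  rw [loopA l 0 PySem.Set.empty (PySem.Dict.counter l) (PySem.Dict.nodup_keys_counter l)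
      (fun k => PySem.Dict.getD_counter l k)
      (fun k => by rw [PySem.Dict.keys_counter, PySem.Set.mem_ofList]),
    revpass l.reverse [] PySem.Set.empty]
  simp only [List.nil_append]
  rw [sizes_reverse l, zipfold l 0 PySem.Set.empty]
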